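-- pv_equiv track=rewrite | github.com/abdelom/oriented_mld | tree_depth.py | clade_in_block
-- ===== SOURCE A (Python) =====
-- def clade_in_block(list_incompatibilities, partition_pos):
--     """
--
--     :param list_incompatibilities:liste des sites incompatible avec la ti courante.
--     :param partition_pos: liste des position de la partition courante
--     :return:list de tuples délimitant des bloques dans lequel la partition est réalisée
--     """
--     list_blocks = []
--     inf = list_incompatibilities[0]
--     i = 0
--     for sup in list_incompatibilities[1:]:
--         while i < len(partition_pos) and partition_pos[i] < inf:
--             i += 1
--         if i == len(partition_pos):
--             break
--         if inf < partition_pos[i] < sup: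
--             list_blocks.append((inf, sup))
--         inf = sup
--     return list_blocks
-- ===== SOURCE B (Python) =====
-- def clade_in_block(list_incompatibilities, partition_pos):
--     blocks = []
--     # remaining partition positions as a stack (next candidate on top)
--     stack = partition_pos[::-1]
--     for inf, sup in zip(list_incompatibilities, list_incompatibilities[1:]):
--         while stack and stack[-1] < inf:
--             stack.pop()
--         if not stack:
--             break
--         if inf < stack[-1] < sup:
--             blocks.append((inf, sup))
--     return blocks
-- ===== Notes on version B (the rewrite author's own statement) =====
-- stated objective: idiomatic
-- what changed: B iterates over consecutive pairs via zip and consumes the partition positions as a stack of remaining candidates (pop until top >= inf), instead of A's explicit index pointer with bounds checks and a carried inf variable.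
import Mathlib
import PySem

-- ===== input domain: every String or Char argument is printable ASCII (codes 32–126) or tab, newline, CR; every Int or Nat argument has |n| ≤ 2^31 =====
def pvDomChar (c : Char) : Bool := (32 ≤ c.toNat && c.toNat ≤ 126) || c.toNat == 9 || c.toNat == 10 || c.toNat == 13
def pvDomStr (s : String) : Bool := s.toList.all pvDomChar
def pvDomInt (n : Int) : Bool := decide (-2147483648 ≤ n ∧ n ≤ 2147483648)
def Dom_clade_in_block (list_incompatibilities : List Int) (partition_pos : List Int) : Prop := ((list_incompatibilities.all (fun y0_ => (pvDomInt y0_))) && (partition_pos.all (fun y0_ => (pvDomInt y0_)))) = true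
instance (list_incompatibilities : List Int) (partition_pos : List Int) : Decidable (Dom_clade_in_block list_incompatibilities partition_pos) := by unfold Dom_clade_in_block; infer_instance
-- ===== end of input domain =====

-- B replaces A's persistent index pointer with bounds checks by iteration over zip
-- pairs consuming the partition positions as a stack (idiomatic decomposition; same cost).

-- ===== PORT A =====
-- the inner 'while i < len(partition_pos) and partition_pos[i] < inf: i += 1'
def pvWhileAdv (pp : List Int) (inf : Int) (i : Nat) : Nat :=
  if i < pp.length ∧ pp.getD i 0 < inf then pvWhileAdv pp inf (i + 1) else i
termination_by pp.length - i
decreasing_by omega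

-- the 'for sup in list_incompatibilities[1:]' loop with break, state (inf, i, list_blocks)
def pvLoopA (pp : List Int) (sups : List Int) (inf : Int) (i : Nat)
    (blocks : List (Int × Int)) : List (Int × Int) :=
  match sups with
  | [] => blocks
  | sup :: rest =>
      let i' := pvWhileAdv pp inf i
      if i' = pp.length then blocks
      else pvLoopA pp rest sup i'
        (blocks ++ if inf < pp.getD i' 0 ∧ pp.getD i' 0 < sup then [(inf, sup)] else [])

-- list_incompatibilities[0] raises on []; that case is excluded by Pre_ below
def clade_in_block (list_incompatibilities : List Int) (partition_pos : List Int) :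
    List (Int × Int) :=
  match list_incompatibilities with
  | [] => []
  | inf :: rest => pvLoopA partition_pos rest inf 0 []

-- ===== PORT B =====
-- Python's stack = partition_pos[::-1] with the top at the END is represented here as
-- the list with the top at the HEAD (same sequence of candidates); so stack[-1] is the
-- head, stack.pop() is the tail, and 'while stack and stack[-1] < inf: stack.pop()' is:
def pvDropLt (pos : List Int) (inf : Int) : List Int :=
  match pos with
  | [] => []
  | p :: rest => if inf ≤ p then p :: rest else pvDropLt rest inf

-- the 'for inf, sup in zip(...)' loop with break, state (stack, blocks)
def pvLoopB (pairs : List (Int × Int)) (pos : List Int)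
    (blocks : List (Int × Int)) : List (Int × Int) :=
  match pairs with
  | [] => blocks
  | (inf, sup) :: rest =>
      match pvDropLt pos inf with
      | [] => blocks
      | h :: t =>
          pvLoopB rest (h :: t) (blocks ++ if inf < h ∧ h < sup then [(inf, sup)] else [])

def clade_in_block_alt (list_incompatibilities : List Int) (partition_pos : List Int) :
    List (Int × Int) :=
  pvLoopB (list_incompatibilities.zip (list_incompatibilities.drop 1)) partition_pos []

-- ===== PRECONDITION & SPEC =====
-- Python A evaluates list_incompatibilities[0]: it raises IndexError exactly on the empty list
def Pre_clade_in_block (list_incompatibilities : List Int) (partition_pos : List Int) : Prop :=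
  list_incompatibilities ≠ []
instance (list_incompatibilities : List Int) (partition_pos : List Int) :
    Decidable (Pre_clade_in_block list_incompatibilities partition_pos) := by
  unfold Pre_clade_in_block; infer_instance

def pvWitness_clade_in_block : List Int × List Int := ([1, 3], [2])

def Spec_clade_in_block (list_incompatibilities : List Int) (partition_pos : List Int)
    (out : List (Int × Int)) : Prop :=
  out = clade_in_block_alt list_incompatibilities partition_pos
instance (list_incompatibilities : List Int) (partition_pos : List Int)
    (out : List (Int × Int)) :
    Decidable (Spec_clade_in_block list_incompatibilities partition_pos out) := by
  unfold Spec_clade_in_block; infer_instance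

-- ===== CLAIM (what is proved, stated in full; the proofs are below) =====
def Claim_equal_clade_in_block : Prop := ∀ (list_incompatibilities : List Int) (partition_pos : List Int), Dom_clade_in_block list_incompatibilities partition_pos → Pre_clade_in_block list_incompatibilities partition_pos → Spec_clade_in_block list_incompatibilities partition_pos (clade_in_block list_incompatibilities partition_pos)

-- ===== LEMMAS AND PROOFS =====

-- A's while loop lands within bounds, and the suffix from its landing index is what
-- B's pop-while leaves on the stack
lemma pvWhileAdv_drop (pp : List Int) (inf : Int) (i : Nat) (h : i ≤ pp.length) :
    pvWhileAdv pp inf i ≤ pp.length ∧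
      pp.drop (pvWhileAdv pp inf i) = pvDropLt (pp.drop i) inf := by
  fun_induction pvWhileAdv pp inf i with
  | case1 i hcond ih =>
      obtain ⟨hlt, hget⟩ := hcond
      have hi := ih (by omega)
      refine ⟨hi.1, ?_⟩
      rw [hi.2, List.drop_eq_getElem_cons hlt, pvDropLt,
        List.getD_eq_getElem _ _ hlt] at *
      rw [if_neg (by omega)]
  | case2 i hcond =>
      refine ⟨h, ?_⟩
      by_cases hlt : i < pp.length
      · have hge : inf ≤ pp.getD i 0 := by
          by_contra hx; exact hcond ⟨hlt, by omega⟩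
        rw [List.drop_eq_getElem_cons hlt, pvDropLt,
          if_pos (by rwa [List.getD_eq_getElem _ _ hlt] at hge)]
      · have : pp.drop i = [] := List.drop_eq_nil_of_le (by omega)
        rw [this, pvDropLt]

lemma pvLoopA_eq_pvLoopB (pp : List Int) (sups : List Int) :
    ∀ (inf : Int) (i : Nat) (blocks : List (Int × Int)), i ≤ pp.length →
      pvLoopA pp sups inf i blocks =
        pvLoopB ((inf :: sups).zip sups) (pp.drop i) blocks := by
  induction sups with
  | nil => intro inf i blocks _; rfl
  | cons sup rest ih =>
      intro inf i blocks hi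
      obtain ⟨hle, hdrop⟩ := pvWhileAdv_drop pp inf i hi
      rw [pvLoopA, List.zip_cons_cons, pvLoopB, ← hdrop]
      by_cases hend : pvWhileAdv pp inf i = pp.length
      · rw [if_pos hend, hend, List.drop_length]
      · rw [if_neg hend]
        have hlt : pvWhileAdv pp inf i < pp.length := by omega
        rw [ih _ _ _ hlt.le, List.drop_eq_getElem_cons hlt,
          List.getD_eq_getElem _ _ hlt]

-- ===== VERDICT (by name: the statement is the Claim_ definition above) =====
theorem clade_in_block_spec : Claim_equal_clade_in_block := by
  intro li pp _ hpre
  unfold Spec_clade_in_block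
  match li with
  | [] => exact absurd rfl hpre
  | inf :: rest =>
      show pvLoopA pp rest inf 0 [] = _
      rw [pvLoopA_eq_pvLoopB pp rest inf 0 [] (Nat.zero_le _)]
      rfl
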